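-- pv_equiv track=rewrite | github.com/octbramantya/pfn-mcp | src/pfn_mcp/chat/auth.py | resolve_tenant_from_groups
-- ===== SOURCE A (Python) =====
-- def resolve_tenant_from_groups(groups: list[str]) -> tuple[str | None, bool]:
--     """
--     Resolve tenant code and superuser status from Keycloak groups.
--
--     Returns:
--         (tenant_code, is_superuser)
--         - ("PRS", False) for regular user in PRS tenant
--         - (None, True) for superuser
--         - (None, False) for user with no tenant group
--     """
--     # Normalize group names (remove leading slash if present)
--     normalized = [g.lstrip("/") for g in groups]
--
--     if "superuser" in normalized:
--         return None, True
--
--     # First non-superuser group is the tenant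
--     for group in normalized:
--         if group != "superuser":
--             return group, False
--
--     return None, False
-- ===== SOURCE B (Python) =====
-- def resolve_tenant_from_groups(groups: list[str]) -> tuple[str | None, bool]:
--     """Single pass: early-return on superuser, record first group as tenant."""
--     tenant = None
--     for g in groups:
--         n = g.lstrip("/")
--         if n == "superuser":
--             return None, True
--         if tenant is None:
--             tenant = n
--     return tenant, False
-- ===== Notes on version B (the rewrite author's own statement) =====
-- stated objective: simpler
-- what changed: Replaces A's two-pass structure (build a normalized list, membership-scan it for 'superuser', then a second loop for the first tenant) with one accumulator-maintaining pass that normalizes each group once, returns early on 'superuser', and records the first group as tenant.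
import Mathlib
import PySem

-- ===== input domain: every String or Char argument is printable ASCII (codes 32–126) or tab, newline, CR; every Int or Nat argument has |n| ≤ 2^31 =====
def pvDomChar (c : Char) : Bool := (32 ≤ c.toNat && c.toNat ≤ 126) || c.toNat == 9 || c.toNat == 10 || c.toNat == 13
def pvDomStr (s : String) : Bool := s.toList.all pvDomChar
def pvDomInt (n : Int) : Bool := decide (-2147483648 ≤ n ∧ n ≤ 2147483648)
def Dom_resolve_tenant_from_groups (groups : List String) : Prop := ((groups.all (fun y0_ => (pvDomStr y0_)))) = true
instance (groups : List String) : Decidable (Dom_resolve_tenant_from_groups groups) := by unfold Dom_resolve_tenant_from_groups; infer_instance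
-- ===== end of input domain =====

-- B is a single accumulator-maintaining pass instead of A's two passes over a normalized list (objective: simpler).

-- ===== PORT A =====
-- exact port of Python's g.lstrip("/"): drop leading '/' characters
def pvNormalize (g : String) : String := String.ofList (g.toList.dropWhile (· == '/'))

-- A's second loop: first group that is not "superuser"
def pvFindTenant : List String → Option String × Bool
  | [] => (none, false)
  | g :: rest => if g ≠ "superuser" then (some g, false) else pvFindTenant rest

def resolve_tenant_from_groups (groups : List String) : Option String × Bool :=
  let normalized := groups.map pvNormalize
  if "superuser" ∈ normalized then (none, true)
  else pvFindTenant normalized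

-- ===== PORT B =====
def pvAltLoop (tenant : Option String) : List String → Option String × Bool
  | [] => (tenant, false)
  | g :: rest =>
    let n := pvNormalize g
    if n = "superuser" then (none, true)
    else pvAltLoop (match tenant with | none => some n | some t => some t) rest

def resolve_tenant_from_groups_alt (groups : List String) : Option String × Bool :=
  pvAltLoop none groups

-- ===== PRECONDITION & SPEC =====
def Spec_resolve_tenant_from_groups (groups : List String) (out : Option String × Bool) : Prop := out = resolve_tenant_from_groups_alt groups
instance (groups : List String) (out : Option String × Bool) : Decidable (Spec_resolve_tenant_from_groups groups out) := by unfold Spec_resolve_tenant_from_groups; infer_instance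

-- ===== CLAIM (what is proved, stated in full; the proofs are below) =====
def Claim_equal_resolve_tenant_from_groups : Prop := ∀ (groups : List String), Dom_resolve_tenant_from_groups groups → Spec_resolve_tenant_from_groups groups (resolve_tenant_from_groups groups)

-- ===== LEMMAS AND PROOFS =====

theorem pvFindTenant_no_super (ns : List String) (h : "superuser" ∉ ns) :
    pvFindTenant ns = (ns.head?, false) := by
  cases ns with
  | nil => rfl
  | cons g rest =>
    simp only [List.mem_cons, not_or] at h
    simp [pvFindTenant, Ne.symm h.1]

theorem pvAltLoop_eq (gs : List String) : ∀ (tenant : Option String),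
    pvAltLoop tenant gs =
      if "superuser" ∈ gs.map pvNormalize then (none, true)
      else (tenant.or (gs.map pvNormalize).head?, false) := by
  induction gs with
  | nil => intro tenant; simp [pvAltLoop]
  | cons g rest ih =>
    intro tenant
    by_cases hg : pvNormalize g = "superuser"
    · simp [pvAltLoop, hg]
    · simp only [pvAltLoop, hg, List.map_cons, List.mem_cons, ih]
      by_cases hm : "superuser" ∈ rest.map pvNormalize
      · simp [hm, Ne.symm hg]
      · simp [hm, Ne.symm hg]
        cases tenant <;> simp

-- ===== VERDICT (by name: the statement is the Claim_ definition above) =====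
theorem resolve_tenant_from_groups_spec : Claim_equal_resolve_tenant_from_groups := by
  intro groups _
  unfold Spec_resolve_tenant_from_groups resolve_tenant_from_groups resolve_tenant_from_groups_alt
  rw [pvAltLoop_eq]
  by_cases hm : "superuser" ∈ groups.map pvNormalize
  · simp [hm]
  · simp [hm, pvFindTenant_no_super _ hm]
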